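-- pv_equiv track=rewrite | github.com/atrox3d/iterators-itertools | main-itertools.py | naive_grouper
-- ===== SOURCE A (Python) =====
-- def naive_grouper(inputs, n):
--     num_groups = len(inputs) // n
--     return [
--         tuple(
--             inputs[
--                 i*n:(i+1)*n
--             ]
--         ) for i in range(num_groups)
--     ]
-- ===== SOURCE B (Python) =====
-- def naive_grouper(inputs, n):
--     num_groups = len(inputs) // n
--     it = iter(inputs)
--     return [tuple(next(it) for _ in range(n)) for _ in range(num_groups)]
-- ===== Notes on version B (the rewrite author's own statement) =====
-- stated objective: alternative
-- what changed: Replaces index-computed slicing (inputs[i*n:(i+1)*n] per group) with a single shared sequential iterator from which each group pulls its n elements with next(); num_groups = len(inputs)//n is kept, preserving the ZeroDivisionError on n==0 and the empty result for negative n.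
import Mathlib
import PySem

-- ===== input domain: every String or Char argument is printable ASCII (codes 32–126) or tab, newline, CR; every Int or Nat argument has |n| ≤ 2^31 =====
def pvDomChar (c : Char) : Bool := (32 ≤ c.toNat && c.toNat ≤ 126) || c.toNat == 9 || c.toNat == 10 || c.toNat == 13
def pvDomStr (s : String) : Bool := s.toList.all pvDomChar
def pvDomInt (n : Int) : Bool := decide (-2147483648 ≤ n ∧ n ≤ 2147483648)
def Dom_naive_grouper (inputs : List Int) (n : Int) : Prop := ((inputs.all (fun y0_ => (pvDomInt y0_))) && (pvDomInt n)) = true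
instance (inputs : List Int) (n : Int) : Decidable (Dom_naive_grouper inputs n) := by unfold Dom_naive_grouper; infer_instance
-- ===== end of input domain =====

-- B groups via one sequential pass consuming n elements per group instead of A's
-- index-computed slices; same cost, different traversal (objective: alternative).

-- ===== PORT A =====
-- num_groups = len(inputs) // n; [tuple(inputs[i*n:(i+1)*n]) for i in range(num_groups)]
def naive_grouper (inputs : List Int) (n : Int) : List (List Int) :=
  let num_groups := PySem.Int.floordiv (inputs.length : Int) n
  (PySem.List.pyRange 0 num_groups 1).map
    (fun i => PySem.List.slice inputs (some (i * n)) (some ((i + 1) * n)))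

-- ===== PORT B =====
-- pull n elements from the shared iterator for each of the num_groups groups
def pvPull (k n : Nat) (rest : List Int) : List (List Int) :=
  match k with
  | 0 => []
  | Nat.succ k' => rest.take n :: pvPull k' n (rest.drop n)

def naive_grouper_alt (inputs : List Int) (n : Int) : List (List Int) :=
  let num_groups := PySem.Int.floordiv (inputs.length : Int) n
  pvPull num_groups.toNat n.toNat inputs

-- ===== PRECONDITION & SPEC =====
-- Python raises ZeroDivisionError (in both A and B) when n = 0
def Pre_naive_grouper (inputs : List Int) (n : Int) : Prop := n ≠ 0
instance (inputs : List Int) (n : Int) : Decidable (Pre_naive_grouper inputs n) := by unfold Pre_naive_grouper; infer_instance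
def pvWitness_naive_grouper : List Int × Int := ([1, 2, 3, 4, 5], 2)

def Spec_naive_grouper (inputs : List Int) (n : Int) (out : List (List Int)) : Prop := out = naive_grouper_alt inputs n
instance (inputs : List Int) (n : Int) (out : List (List Int)) : Decidable (Spec_naive_grouper inputs n out) := by unfold Spec_naive_grouper; infer_instance

-- ===== CLAIM (what is proved, stated in full; the proofs are below) =====
def Claim_equal_naive_grouper : Prop := ∀ (inputs : List Int) (n : Int), Dom_naive_grouper inputs n → Pre_naive_grouper inputs n → Spec_naive_grouper inputs n (naive_grouper inputs n)

-- ===== LEMMAS AND PROOFS =====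

-- sequential pulling equals slicing at computed offsets, for a positive Nat group size
lemma pvPull_eq_map_range (m : Nat) : ∀ (k : Nat) (xs : List Int),
    (List.range k).map (fun i => (xs.drop (i * m)).take m) = pvPull k m xs := by
  intro k
  induction k with
  | zero => intro xs; rfl
  | succ k ih =>
    intro xs
    rw [List.range_succ_eq_map, List.map_cons, List.map_map, pvPull]
    simp only [Nat.zero_mul, List.drop_zero]
    congr 1
    rw [← ih (xs.drop m)]
    apply List.map_congr_left
    intro i _
    simp [Function.comp, Nat.succ_mul, List.drop_drop, Nat.add_comm]

theorem naive_grouper_spec : Claim_equal_naive_grouper := by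
  intro inputs n _ hn
  unfold Spec_naive_grouper naive_grouper naive_grouper_alt
  simp only []
  rcases lt_or_gt_of_ne hn with hneg | hpos
  · -- n < 0 : num_groups ≤ 0, both sides empty
    have hle : PySem.Int.floordiv (inputs.length : Int) n ≤ 0 := by
      by_contra h
      push Not at h
      have := PySem.Int.floordiv_mul_add_mod (inputs.length : Int) n
      have hm := PySem.Int.mod_neg_bounds (a := (inputs.length : Int)) (b := n) hneg
      nlinarith [Int.natCast_nonneg inputs.length]
    rw [PySem.List.pyRange_one_eq_nil hle]
    have : (PySem.Int.floordiv (inputs.length : Int) n).toNat = 0 := Int.toNat_of_nonpos hle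
    rw [this]
    rfl
  · -- n > 0
    obtain ⟨m, rfl⟩ : ∃ m : Nat, n = (m : Int) := ⟨n.toNat, (Int.toNat_of_nonneg hpos.le).symm⟩
    have hg : 0 ≤ PySem.Int.floordiv (inputs.length : Int) (m : Int) := by
      have := PySem.Int.floordiv_mul_add_mod (inputs.length : Int) (m : Int)
      have hm := PySem.Int.mod_lt (a := (inputs.length : Int)) hpos
      by_contra h
      push Not at h
      nlinarith [Int.natCast_nonneg inputs.length]
    rw [PySem.List.pyRange_one]
    simp only [Int.sub_zero, Int.toNat_natCast]
    rw [← pvPull_eq_map_range m _ inputs, List.map_map]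
    apply List.map_congr_left
    intro i hi
    have h0i : (0:Int) ≤ (i : Int) := Int.natCast_nonneg i
    simp only [Function.comp, zero_add]
    rw [PySem.List.slice_toNat _ (by positivity) (by positivity)]
    have h1 : ((i : Int) * (m : Int)).toNat = i * m := by
      rw [← Nat.cast_mul, Int.toNat_natCast]
    have h2 : (((i : Int) + 1) * (m : Int)).toNat = (i + 1) * m := by
      rw [show ((i : Int) + 1) = (((i + 1 : Nat)) : Int) by push_cast; ring,
        ← Nat.cast_mul, Int.toNat_natCast]
    rw [h1, h2, Nat.succ_mul, Nat.add_sub_cancel_left]
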